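-- pv_equiv track=rewrite | github.com/nicklauri/kpbasictools | maskshow.py | sub2int
-- ===== SOURCE A (Python) =====
-- def sub2int(string):
-- 	res = ''
-- 	ret = 0
-- 	for i in string.split('.'):
-- 		res = ''.join([res, bin(int(i, 10))[2:]])
--
-- 	for c in res:
-- 		if c == '1':
-- 			ret += 1
--
-- 	return ret
-- ===== SOURCE B (Python) =====
-- def sub2int(string):
--     ret = 0
--     for i in string.split('.'):
--         n = abs(int(i, 10))
--         while n:
--             n &= n - 1
--             ret += 1
--     return ret
-- ===== Notes on version B (the rewrite author's own statement) =====
-- stated objective: idiomatic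
-- what changed: Instead of concatenating the binary-string representation of every dot-separated part and then scanning the accumulated string character by character, B keeps a single integer per part and counts its set bits with Kernighan's n &= n-1 loop, never building any string.
import Mathlib
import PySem

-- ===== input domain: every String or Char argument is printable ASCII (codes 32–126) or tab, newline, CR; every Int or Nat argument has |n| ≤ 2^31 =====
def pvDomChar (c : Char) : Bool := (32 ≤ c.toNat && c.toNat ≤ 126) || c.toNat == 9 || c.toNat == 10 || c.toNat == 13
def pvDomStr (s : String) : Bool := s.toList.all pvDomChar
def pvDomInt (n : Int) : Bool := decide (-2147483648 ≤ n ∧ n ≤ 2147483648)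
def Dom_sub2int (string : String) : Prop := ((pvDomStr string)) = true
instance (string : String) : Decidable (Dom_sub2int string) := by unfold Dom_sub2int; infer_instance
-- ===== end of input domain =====

-- B replaces A's binary-string concatenation + character scan by Kernighan's n &= n-1
-- set-bit count on each dot-separated integer (idiomatic; no strings are built).


-- ===== PORT A =====
-- one step of A's first loop: res = ''.join([res, bin(int(i, 10))[2:]])
-- (int(i, 10) raising ValueError is modelled by Option; Pre_ excludes those inputs)
def sub2intStepA (r : Option (List Char)) (i : String) : Option (List Char) :=
  r.bind fun res =>
    (PySem.Int.ofStrBase? i 10).map fun n =>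
      res ++ PySem.List.slice (PySem.Int.pyBin n).toList (some 2) none

def sub2int (string : String) : Int :=
  match (((PySem.Str.split? string ".").getD [])).foldl sub2intStepA (some []) with
  | none => 0  -- unreachable under Pre_ (ValueError in Python)
  | some res => res.foldl (fun ret c => if c == '1' then ret + 1 else ret) (0 : Int)

-- ===== PORT B =====
-- the Kernighan loop: while n: n &= n - 1; ret += 1
def kernighan (n : Nat) (ret : Int) : Int :=
  if n = 0 then ret else kernighan (n &&& (n - 1)) (ret + 1)
decreasing_by exact Nat.lt_of_le_of_lt Nat.and_le_right (by omega)

def sub2int_alt (string : String) : Int :=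
  (((PySem.Str.split? string ".").getD [])).foldl
    (fun ret i =>
      match PySem.Int.ofStrBase? i 10 with
      | none => ret  -- unreachable under Pre_ (ValueError in Python)
      | some n => kernighan n.natAbs ret) 0

-- ===== PRECONDITION & SPEC =====
-- Pre_ excludes exactly the inputs on which int(i, 10) raises ValueError for some
-- dot-separated part (both A and B raise there, at the same part).
def Pre_sub2int (string : String) : Prop :=
  ∀ i ∈ ((PySem.Str.split? string ".").getD []), (PySem.Int.ofStrBase? i 10).isSome = true
instance (string : String) : Decidable (Pre_sub2int string) := by unfold Pre_sub2int; infer_instance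
def pvWitness_sub2int : String := "255.-12.0"

def Spec_sub2int (string : String) (out : Int) : Prop := out = sub2int_alt string
instance (string : String) (out : Int) : Decidable (Spec_sub2int string out) := by unfold Spec_sub2int; infer_instance

-- ===== CLAIM (what is proved, stated in full; the proofs are below) =====
def Claim_equal_sub2int : Prop := ∀ (string : String), Dom_sub2int string → Pre_sub2int string → Spec_sub2int string (sub2int string)

-- ===== LEMMAS AND PROOFS =====

-- the binary digits (MSB first) that Nat.toDigits 2 produces, as structural recursion
def binAux (n : Nat) : List Char :=
  if h : n / 2 = 0 then [Nat.digitChar (n % 2)]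
  else binAux (n / 2) ++ [Nat.digitChar (n % 2)]
decreasing_by omega

lemma toDigitsCore_eq_binAux : ∀ (f n : Nat) (l : List Char), n < f →
    Nat.toDigitsCore 2 f n l = binAux n ++ l := by
  intro f
  induction f with
  | zero => omega
  | succ f ih =>
    intro n l h
    rw [Nat.toDigitsCore, binAux]
    by_cases h2 : n / 2 = 0
    · simp [h2]
    · simp only [h2, if_false]
      rw [ih (n / 2) _ (by omega)]
      simp

lemma toDigits_eq_binAux (n : Nat) : Nat.toDigits 2 n = binAux n :=
  (toDigitsCore_eq_binAux (n + 1) n [] (by omega)).trans (by simp)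

lemma count_digitChar_mod_two (n : Nat) :
    ([Nat.digitChar (n % 2)].count '1' : Nat) = n % 2 := by
  rcases Nat.mod_two_eq_zero_or_one n with h | h <;> rw [h] <;> decide

lemma count_binAux (n : Nat) : (binAux n).count '1' = PySem.Int.bitCount (n : Int) := by
  induction n using Nat.strong_induction_on with
  | _ n ih =>
    rw [binAux]
    by_cases h2 : n / 2 = 0
    · have : n = 0 ∨ n = 1 := by omega
      rcases this with rfl | rfl <;> simp [h2] <;> decide
    · have hn : 0 < n := by omega
      rw [dif_neg h2, List.count_append, ih (n / 2) (by omega),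
        PySem.Int.bitCount_natCast hn, count_digitChar_mod_two]
      omega

-- count of '1' in bin(n)[2:] is bit_count(n)
lemma count_chunk (n : Int) :
    ((PySem.List.slice (PySem.Int.pyBin n).toList (some 2) none).count '1' : Nat)
      = PySem.Int.bitCount n := by
  rw [PySem.Int.toList_pyBin, PySem.List.slice_from _ (by omega),
    show ((2:Int).toNat) = 2 from rfl]
  have habs : PySem.Int.bitCount ((n.natAbs : Nat) : Int) = PySem.Int.bitCount n := by
    simp [PySem.Int.bitCount, Int.natAbs_abs]
  unfold PySem.Int.toBinChars0b
  by_cases h : n < 0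
  · simp only [h, if_true]
    have : (('-' :: '0' :: 'b' :: Nat.toDigits 2 n.natAbs).drop 2)
        = 'b' :: Nat.toDigits 2 n.natAbs := rfl
    rw [this, List.count_cons, toDigits_eq_binAux, count_binAux, habs]
    simp
  · simp only [h, if_false]
    have : (('0' :: 'b' :: Nat.toDigits 2 n.toNat).drop 2) = Nat.toDigits 2 n.toNat := rfl
    rw [this, toDigits_eq_binAux, count_binAux]
    rw [show n.toNat = n.natAbs by omega, habs]

-- clearing the lowest set bit drops the popcount by one
lemma land_pred_odd (n : Nat) (h : n % 2 = 1) : n &&& (n - 1) = n - 1 := by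
  apply Nat.eq_of_testBit_eq
  intro i
  rw [Nat.testBit_land]
  cases i with
  | zero =>
    rw [Nat.testBit_zero]
    have : (n - 1) % 2 = 0 := by omega
    simp [this]
  | succ i =>
    simp only [Nat.testBit_add_one]
    have : (n - 1) / 2 = n / 2 := by omega
    rw [this, Bool.and_self]

lemma land_pred_even (n : Nat) (h0 : 0 < n) (h : n % 2 = 0) :
    n &&& (n - 1) = 2 * ((n / 2) &&& (n / 2 - 1)) := by
  apply Nat.eq_of_testBit_eq
  intro i
  rw [Nat.testBit_land]
  cases i with
  | zero =>
    rw [Nat.testBit_zero, Nat.testBit_zero]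
    have h1 : ¬ (n % 2 = 1) := by omega
    have h2 : ¬ ((2 * (n / 2 &&& (n / 2 - 1))) % 2 = 1) := by omega
    simp [h1]
  | succ i =>
    simp only [Nat.testBit_add_one]
    have e1 : (n - 1) / 2 = n / 2 - 1 := by omega
    generalize hk : n / 2 &&& (n / 2 - 1) = k
    have e2 : 2 * k / 2 = k := by omega
    rw [e1, e2, ← hk, Nat.testBit_land]

lemma bitCount_two_mul (m : Nat) :
    PySem.Int.bitCount ((2 * m : Nat) : Int) = PySem.Int.bitCount (m : Int) := by
  rcases Nat.eq_zero_or_pos m with rfl | hm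
  · rfl
  · rw [PySem.Int.bitCount_natCast (by omega : 0 < 2 * m)]
    have : 2 * m / 2 = m := by omega
    rw [this]
    omega

lemma bitCount_land_pred : ∀ n : Nat, 0 < n →
    PySem.Int.bitCount ((n &&& (n - 1) : Nat) : Int) + 1 = PySem.Int.bitCount (n : Int) := by
  intro n
  induction n using Nat.strong_induction_on with
  | _ n ih =>
    intro h
    rcases Nat.mod_two_eq_zero_or_one n with he | ho
    · rw [land_pred_even n h he, bitCount_two_mul,
        ih (n / 2) (by omega) (by omega),
        PySem.Int.bitCount_natCast h, he]
      omega
    · rw [land_pred_odd n ho,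
        show n - 1 = 2 * (n / 2) by omega, bitCount_two_mul,
        PySem.Int.bitCount_natCast h, ho]
      omega

lemma kernighan_eq (n : Nat) : ∀ ret : Int,
    kernighan n ret = ret + PySem.Int.bitCount (n : Int) := by
  induction n using Nat.strong_induction_on with
  | _ n ih =>
    intro ret
    rw [kernighan]
    rcases Nat.eq_zero_or_pos n with rfl | hn
    · simp
    · rw [if_neg (by omega),
        ih (n &&& (n - 1)) (Nat.lt_of_le_of_lt Nat.and_le_right (by omega))]
      have := bitCount_land_pred n hn
      omega

-- A's first loop builds the concatenation of the per-part chunks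
lemma foldA_eq (parts : List String)
    (h : ∀ i ∈ parts, (PySem.Int.ofStrBase? i 10).isSome = true) :
    ∀ res : List Char, parts.foldl sub2intStepA (some res)
      = some (res ++ parts.flatMap (fun i =>
          match PySem.Int.ofStrBase? i 10 with
          | none => []
          | some n => PySem.List.slice (PySem.Int.pyBin n).toList (some 2) none)) := by
  induction parts with
  | nil => intro res; simp
  | cons i ps ih =>
    intro res
    obtain ⟨n, hn⟩ := Option.isSome_iff_exists.mp (h i (by simp))
    have hstep : sub2intStepA (some res) i
        = some (res ++ PySem.List.slice (PySem.Int.pyBin n).toList (some 2) none) := by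
      simp [sub2intStepA, hn]
    rw [List.foldl_cons, hstep, ih (fun j hj => h j (by simp [hj]))]
    simp [hn]

-- B's loop accumulates the per-part bit counts
lemma foldB_eq (parts : List String) : ∀ ret : Int,
    parts.foldl (fun ret i =>
      match PySem.Int.ofStrBase? i 10 with
      | none => ret
      | some n => kernighan n.natAbs ret) ret
    = ret + ((parts.map (fun i =>
        match PySem.Int.ofStrBase? i 10 with
        | none => (0 : Int)
        | some n => (PySem.Int.bitCount n : Int))).sum) := by
  induction parts with
  | nil => intro ret; simp
  | cons i ps ih =>
    intro ret
    rw [List.foldl_cons, List.map_cons, List.sum_cons]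
    cases hn : PySem.Int.ofStrBase? i 10 with
    | none => dsimp only; rw [ih]; ring
    | some n =>
      dsimp only
      rw [kernighan_eq, ih]
      have : PySem.Int.bitCount ((n.natAbs : Nat) : Int) = PySem.Int.bitCount n := by
        simp [PySem.Int.bitCount, Int.natAbs_abs]
      rw [this]; ring

lemma count_flatMap_sum (parts : List String) (f : String → List Char) :
    ((parts.flatMap f).count '1' : Int)
      = (parts.map (fun i => ((f i).count '1' : Int))).sum := by
  induction parts with
  | nil => simp
  | cons i ps ih => simp [List.count_append, ih]

-- ===== VERDICT (by name: the statement is the Claim_ definition above) =====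
theorem sub2int_spec : Claim_equal_sub2int := by
  intro string _ hpre
  unfold Spec_sub2int sub2int sub2int_alt
  rw [foldA_eq _ hpre []]
  dsimp only
  rw [PySem.List.foldl_beq_add_one, foldB_eq]
  rw [List.nil_append, count_flatMap_sum]
  simp only [zero_add]
  congr 1
  apply List.map_congr_left
  intro i hi
  obtain ⟨n, hn⟩ := Option.isSome_iff_exists.mp (hpre i hi)
  rw [hn]
  dsimp only
  rw [← count_chunk n]
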